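-- pv_equiv track=rewrite | github.com/Klyah98/my_functions | positive_augmentation.py | one_zero_augmentation
-- ===== SOURCE A (Python) =====
-- def one_zero_augmentation(string):
--     if string[-1] == '0':
--         previous_was_zero = True
--     else:
--         previous_was_zero = False
--     aug = []
--     string_indices = range(len(string) - 1, -1, -1)
--     for i in string_indices:
--         if string[i] == '0':
--             previous_was_zero = True
--         else:
--             if previous_was_zero:
--                 aug.append(string[:i + 1] + '0' + string[i + 1:])
--                 previous_was_zero = False
--     if previous_was_zero:
--         aug.append('0' + string)
--     return aug
-- ===== SOURCE B (Python) =====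
-- def one_zero_augmentation(string):
--     # Block decomposition, explicit-stack form: peel the maximal blocks of equal
--     # characters left to right, then fold back right-to-left, prefixing each block
--     # onto the variants so far and adding the variant that extends a zero block.
--     blocks = []
--     i = 0
--     while i < len(string):
--         c = string[i]
--         j = i + 1
--         while j < len(string) and string[j] == c:
--             j += 1
--         blocks.append(string[i:j])
--         i = j
--     suffix = ''
--     out = []
--     for b in reversed(blocks):
--         suffix = b + suffix
--         out = [b + v for v in out]
--         if b[0] == '0':
--             out.append('0' + suffix)
--     return out
-- ===== Notes on version B (the rewrite author's own statement) =====
-- stated objective: alternative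
-- what changed: A's single right-to-left scan carrying a previous_was_zero flag is replaced by a block decomposition: B first peels the string into its maximal blocks of equal characters, then folds over the blocks right-to-left, prefixing each block onto the variants accumulated so far and adding the variant that extends a zero block.
import Mathlib
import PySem

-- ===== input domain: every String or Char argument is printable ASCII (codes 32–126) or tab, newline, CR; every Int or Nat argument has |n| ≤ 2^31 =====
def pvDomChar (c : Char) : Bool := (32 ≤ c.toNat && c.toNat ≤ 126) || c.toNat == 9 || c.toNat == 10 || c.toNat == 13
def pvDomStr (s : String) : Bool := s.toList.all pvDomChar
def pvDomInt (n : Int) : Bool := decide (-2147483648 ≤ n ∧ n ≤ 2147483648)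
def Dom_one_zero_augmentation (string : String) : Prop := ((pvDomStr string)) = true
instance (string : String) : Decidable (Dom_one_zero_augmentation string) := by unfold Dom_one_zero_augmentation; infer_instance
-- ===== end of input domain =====

-- B replaces A's stateful right-to-left flag scan by a block decomposition: peel the maximal
-- blocks of equal characters left to right, then fold back right-to-left, prefixing each block
-- onto the variants so far and adding the zero-block variant; objective: alternative.
-- B replaces A's stateful right-to-left flag scan by a recursive decomposition: peel the
-- maximal leading block of equal characters, recurse on the remainder, prefix the block
-- onto each suffix variant, then add the leading-zero-block variant; objective: alternative.
-- Pre_ excludes only "", where A raises IndexError (string[-1]).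


-- ===== PORT A =====
-- loop body of A's 'for i in string_indices' (state = (previous_was_zero, aug))
def ozaStep (s : List Char) (acc : Bool × List String) (i : Int) : Bool × List String :=
  if PySem.List.pyGetD s i ' ' == '0' then (true, acc.2)
  else if acc.1 then
    (false, acc.2 ++ [String.ofList (PySem.List.slice s none (some (i + 1)) ++
                                     '0' :: PySem.List.slice s (some (i + 1)) none)])
  else acc

def one_zero_augmentation (string : String) : List String :=
  let s := string.toList
  match PySem.List.pyGet? s (-1) with
  | none => []   -- string[-1] raises IndexError on ""; excluded by Pre_
  | some c =>
    let st := (PySem.List.pyRange ((s.length : Int) - 1) (-1) (-1)).foldl (ozaStep s) (c == '0', [])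
    if st.1 then st.2 ++ [String.ofList ('0' :: s)] else st.2

-- ===== PORT B =====
-- B's inner while loop: length of the maximal block of chars equal to c at the front of t
def ozaScan (c : Char) : List Char → Nat
  | [] => 0
  | x :: xs => if x == c then ozaScan c xs + 1 else 0

-- B's outer while loop: the maximal blocks of equal characters, left to right
def ozaBlocks : List Char → List (List Char)
  | [] => []
  | c :: t => (c :: t.take (ozaScan c t)) :: ozaBlocks (t.drop (ozaScan c t))
termination_by s => s.length
decreasing_by simp [List.length_drop]

-- B's 'for b in reversed(blocks)' body (state = (suffix, out)); b[0] via pyGetD (each block is nonempty)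
def ozaStepB (acc : List Char × List (List Char)) (b : List Char) : List Char × List (List Char) :=
  let suffix := b ++ acc.1
  let out := acc.2.map (fun v => b ++ v)
  if PySem.List.pyGetD b 0 ' ' == '0' then (suffix, out ++ ['0' :: suffix]) else (suffix, out)

def one_zero_augmentation_alt (string : String) : List String :=
  ((((ozaBlocks string.toList).reverse.foldl ozaStepB ([], [])).2).map String.ofList)

-- ===== PRECONDITION & SPEC =====
-- Pre_ excludes only the empty string, on which A raises IndexError at string[-1].
def Pre_one_zero_augmentation (string : String) : Prop := string.toList ≠ []
instance (string : String) : Decidable (Pre_one_zero_augmentation string) := by unfold Pre_one_zero_augmentation; infer_instance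
def pvWitness_one_zero_augmentation : String := "a010"

def Spec_one_zero_augmentation (string : String) (out : List String) : Prop := out = one_zero_augmentation_alt string
instance (string : String) (out : List String) : Decidable (Spec_one_zero_augmentation string out) := by unfold Spec_one_zero_augmentation; infer_instance

-- ===== CLAIM (what is proved, stated in full; the proofs are below) =====
def Claim_equal_one_zero_augmentation : Prop := ∀ (string : String), Dom_one_zero_augmentation string → Pre_one_zero_augmentation string → Spec_one_zero_augmentation string (one_zero_augmentation string)

-- ===== LEMMAS AND PROOFS =====

-- "the char at index k is '0'" (false past the end: pyGetD's default ' ')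
def pvP (s : List Char) (k : Nat) : Bool := PySem.List.pyGetD s (k : Int) ' ' == '0'
-- "k is the start of a maximal '0'-run"
def pvQ (s : List Char) (k : Nat) : Bool := pvP s k && (k == 0 || !pvP s (k - 1))
-- the variant inserting '0' at position k, as a char list and as a String
def pvInsL (s : List Char) (k : Nat) : List Char := s.take k ++ '0' :: s.drop k
def pvIns (s : List Char) (k : Nat) : String := String.ofList (pvInsL s k)
-- outputs of A's loop steps i = k-1 … 0 (run starts k … 1, right to left)
def pvOuts (s : List Char) : Nat → List String
  | 0 => []
  | k + 1 => (if pvQ s (k + 1) then [pvIns s (k + 1)] else []) ++ pvOuts s k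
-- canonical form: variants for run starts m-1 … 0, right to left (char-list level and String level)
def pvBrecL (s : List Char) : Nat → List (List Char)
  | 0 => []
  | m + 1 => (if pvQ s m then [pvInsL s m] else []) ++ pvBrecL s m
def pvBrec (s : List Char) : Nat → List String
  | 0 => []
  | m + 1 => (if pvQ s m then [pvIns s m] else []) ++ pvBrec s m

theorem pvP_len (s : List Char) : pvP s s.length = false := by
  simp [pvP, pysem]

theorem pvP_getD (s : List Char) (k : Nat) : pvP s k = (s.getD k ' ' == '0') := by
  simp [pvP, pysem]

theorem oza_step (s : List Char) (k : Nat) (acc : List String) :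
    ozaStep s (pvP s (k + 1), acc) (k : Int) =
      (pvP s k, acc ++ if pvQ s (k + 1) then [pvIns s (k + 1)] else []) := by
  have hc : ((k : Int) + 1) = ((k + 1 : Nat) : Int) := by push_cast; ring
  have hins : String.ofList (PySem.List.slice s none (some ((k : Int) + 1)) ++
      '0' :: PySem.List.slice s (some ((k : Int) + 1)) none) = pvIns s (k + 1) := by
    rw [hc, PySem.List.slice_to_natCast, PySem.List.slice_from_natCast]; rfl
  by_cases h0 : pvP s k
  · have h0g : (PySem.List.pyGetD s (k : Int) ' ' == '0') = true := h0
    have hq : pvQ s (k + 1) = false := by simp [pvQ, h0]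
    unfold ozaStep
    dsimp only
    rw [if_pos h0g, hq, h0]
    simp
  · have h0g : ¬ (PySem.List.pyGetD s (k : Int) ' ' == '0') = true := h0
    have h0'' : pvP s k = false := Bool.eq_false_iff.mpr h0
    unfold ozaStep
    dsimp only
    rw [if_neg h0g]
    by_cases h1 : pvP s (k + 1)
    · have hq : pvQ s (k + 1) = true := by simp [pvQ, h0'', h1]
      rw [if_pos h1, hq, hins, h0'']
      simp
    · have h1' : pvP s (k + 1) = false := Bool.eq_false_iff.mpr h1
      have hq : pvQ s (k + 1) = false := by simp [pvQ, h1']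
      rw [if_neg h1, hq, h0'', h1']
      simp

theorem oza_loop (s : List Char) (k : Nat) (acc : List String) :
    (PySem.List.pyRange (k : Int) (-1) (-1)).foldl (ozaStep s) (pvP s (k + 1), acc) =
      (pvP s 0, acc ++ pvOuts s (k + 1)) := by
  induction k generalizing acc with
  | zero =>
    rw [PySem.List.pyRange_neg_one_cons (by omega)]
    rw [show ((0 : Nat) : Int) - 1 = -1 by omega]
    rw [PySem.List.pyRange_neg_one_eq_nil (le_refl _)]
    simpa [pvOuts] using oza_step s 0 acc
  | succ k ih =>
    rw [PySem.List.pyRange_neg_one_cons (by omega)]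
    simp only [List.foldl_cons]
    rw [oza_step s (k + 1) acc]
    rw [show ((k + 1 : Nat) : Int) - 1 = (k : Int) by push_cast; ring]
    rw [ih]
    simp [pvOuts, List.append_assoc]

theorem a_char (s : List Char) (h : s ≠ []) :
    one_zero_augmentation (String.ofList s) =
      pvOuts s s.length ++ (if pvQ s 0 then [pvIns s 0] else []) := by
  obtain ⟨n, hn⟩ : ∃ n, s.length = n + 1 :=
    ⟨s.length - 1, by have := List.length_pos_iff.mpr h; omega⟩
  have hget : PySem.List.pyGet? s (-1) = some (s.getLast h) := by
    simp [pysem]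
    exact List.getLast?_eq_some_getLast h
  have hlt : n < s.length := by omega
  have hseed : (s.getLast h == '0') = pvP s n := by
    rw [List.getLast_eq_getElem, pvP]
    have hg : PySem.List.pyGetD s (n : Int) ' ' = s[n] := by
      simp [pysem, List.getD_eq_getElem?_getD, List.getElem?_eq_getElem hlt]
    rw [hg]
    simp [show s.length - 1 = n from by omega]
  have hPlen : pvP s (n + 1) = false := by rw [← hn]; exact pvP_len s
  have hP' : (PySem.List.pyGetD s ((n : Int) + 1) ' ' == '0') = false := by
    rw [show ((n : Int) + 1) = ((n + 1 : Nat) : Int) by push_cast; ring]; exact hPlen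
  have hswap : ozaStep s (pvP s n, ([] : List String)) (n : Int) =
      ozaStep s (pvP s (n + 1), ([] : List String)) (n : Int) := by
    by_cases h0 : pvP s n
    · have h0g : (PySem.List.pyGetD s (n : Int) ' ' == '0') = true := h0
      unfold ozaStep
      dsimp only
      rw [if_pos h0g]
      rw [if_pos h0g]
    · have h0g : ¬ (PySem.List.pyGetD s (n : Int) ' ' == '0') = true := h0
      have h0'' : pvP s n = false := Bool.eq_false_iff.mpr h0
      have hP1 : ¬ pvP s (n + 1) = true := by simp [hPlen]
      unfold ozaStep
      dsimp only
      rw [if_neg h0g, if_neg h0, if_neg hP1, h0'', hPlen]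
      rw [if_neg h0g]
  unfold one_zero_augmentation
  simp only [String.toList_ofList, hget]
  rw [show ((s.length : Int) - 1) = (n : Int) by rw [hn]; push_cast; ring]
  rw [PySem.List.pyRange_neg_one_cons (by omega)]
  simp only [List.foldl_cons, hseed]
  rw [hswap]
  rw [← List.foldl_cons, ← PySem.List.pyRange_neg_one_cons (by omega)]
  rw [oza_loop s n []]
  rw [hn]
  by_cases h0 : pvP s 0 <;> simp [h0, pvQ, pvIns, pvInsL]

theorem brec_outs (s : List Char) (m : Nat) :
    pvBrec s (m + 1) = pvOuts s m ++ (if pvQ s 0 then [pvIns s 0] else []) := by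
  induction m with
  | zero => simp [pvBrec, pvOuts]
  | succ m ih =>
    rw [show pvBrec s (m + 1 + 1) =
          (if pvQ s (m + 1) then [pvIns s (m + 1)] else []) ++ pvBrec s (m + 1) from rfl,
        ih,
        show pvOuts s (m + 1) =
          (if pvQ s (m + 1) then [pvIns s (m + 1)] else []) ++ pvOuts s m from rfl,
        List.append_assoc]

theorem pvBrec_eq_map (s : List Char) (m : Nat) :
    pvBrec s m = (pvBrecL s m).map String.ofList := by
  induction m with
  | zero => rfl
  | succ m ih =>
    by_cases hq : pvQ s m <;>
      simp [pvBrec, pvBrecL, hq, ih, pvIns]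

-- ozaScan facts
theorem scan_le (c : Char) (t : List Char) : ozaScan c t ≤ t.length := by
  induction t with
  | nil => simp [ozaScan]
  | cons x xs ih =>
    by_cases h : (x == c) = true
    · simp only [ozaScan, if_pos h, List.length_cons]
      omega
    · simp [ozaScan, h]

theorem scan_getD (c : Char) (t : List Char) (j : Nat) (hj : j ≤ ozaScan c t) :
    (c :: t).getD j ' ' = c := by
  induction t generalizing j with
  | nil =>
    simp [ozaScan] at hj
    simp [hj]
  | cons x xs ih =>
    by_cases h : (x == c) = true
    · have hx : x = c := by simpa using h
      rw [ozaScan, if_pos h] at hj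
      cases j with
      | zero => rfl
      | succ j' =>
        rw [List.getD_cons_succ, hx]
        exact ih j' (by omega)
    · rw [ozaScan, if_neg h] at hj
      have : j = 0 := by omega
      simp [this]

theorem scan_stop (c : Char) (t : List Char) (h : ozaScan c t < t.length) :
    (t.getD (ozaScan c t) ' ' == c) = false := by
  induction t with
  | nil => simp at h
  | cons x xs ih =>
    by_cases hx : (x == c) = true
    · rw [ozaScan, if_pos hx] at h ⊢
      simpa using ih (by simpa using h)
    · rw [ozaScan, if_neg hx] at h ⊢
      simpa using hx

-- getD through drop
theorem getD_drop (s : List Char) (n j : Nat) :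
    (s.drop n).getD j ' ' = s.getD (n + j) ' ' := by
  simp [List.getD_eq_getElem?_getD, List.getElem?_drop]

-- block facts, for s = c :: t, k = ozaScan c t, rest = t.drop k
theorem pvP_block (c : Char) (t : List Char) (j : Nat) (hj : j ≤ ozaScan c t) :
    pvP (c :: t) j = (c == '0') := by
  rw [pvP_getD, scan_getD c t j hj]

theorem pvP_shift (c : Char) (t : List Char) (j : Nat) :
    pvP (c :: t) (ozaScan c t + 1 + j) = pvP (t.drop (ozaScan c t)) j := by
  rw [pvP_getD, pvP_getD, getD_drop]
  have : (c :: t).getD (ozaScan c t + 1 + j) ' ' = t.getD (ozaScan c t + j) ' ' := by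
    simp [List.getD_eq_getElem?_getD]
    rw [show ozaScan c t + 1 + j = (ozaScan c t + j) + 1 by omega]
    rfl
  rw [this]

theorem pvQ_zero (s : List Char) : pvQ s 0 = pvP s 0 := by
  simp [pvQ]

theorem pvQ_mid (c : Char) (t : List Char) (j : Nat) (hj : j + 1 ≤ ozaScan c t) :
    pvQ (c :: t) (j + 1) = false := by
  have h1 := pvP_block c t (j + 1) hj
  have h2 := pvP_block c t j (by omega)
  simp only [pvQ, h1]
  rw [show j + 1 - 1 = j from by omega, h2]
  by_cases hc : (c == '0') = true <;> simp [hc]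

theorem pvQ_shift (c : Char) (t : List Char) (j : Nat) :
    pvQ (c :: t) (ozaScan c t + 1 + j) = pvQ (t.drop (ozaScan c t)) j := by
  cases j with
  | zero =>
    have hsh := pvP_shift c t 0
    simp only [pvQ, Nat.add_zero]
    rw [show ozaScan c t + 1 - 1 = ozaScan c t from by omega]
    rw [pvP_block c t (ozaScan c t) (le_refl _)]
    rw [show ozaScan c t + 1 = ozaScan c t + 1 + 0 from by omega, hsh]
    have hne : (ozaScan c t + 1 + 0 == 0) = false := by simp
    rw [hne]
    by_cases hr : pvP (t.drop (ozaScan c t)) 0 = true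
    · -- rest starts with '0', hence rest nonempty and its head differs from c, so c ≠ '0'
      have hlen : ozaScan c t < t.length := by
        by_contra hge
        have : t.drop (ozaScan c t) = [] := List.drop_eq_nil_of_le (by omega)
        rw [pvP_getD, this] at hr
        simp at hr
      have hstop := scan_stop c t hlen
      have hr0 : (t.drop (ozaScan c t)).getD 0 ' ' = '0' := by
        rw [pvP_getD] at hr; simpa using hr
      rw [getD_drop, Nat.add_zero] at hr0
      have hcne : (c == '0') = false := by
        rw [hr0] at hstop
        cases hc : (c == '0')
        · rfl
        · have : c = '0' := by simpa using hc
          rw [this] at hstop; simp at hstop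
      rw [hr, hcne]
      simp
    · have hr' : pvP (t.drop (ozaScan c t)) 0 = false := Bool.eq_false_iff.mpr hr
      rw [hr']
      simp
  | succ j' =>
    simp only [pvQ]
    rw [show ozaScan c t + 1 + (j' + 1) - 1 = ozaScan c t + 1 + j' from by omega]
    rw [show ozaScan c t + 1 + (j' + 1) = ozaScan c t + 1 + (j' + 1) from rfl]
    rw [pvP_shift c t (j' + 1), pvP_shift c t j']
    have h1 : (ozaScan c t + 1 + (j' + 1) == 0) = false := by simp
    have h2 : ((j' + 1 : Nat) == 0) = false := by simp
    rw [h1, h2]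
    rw [show j' + 1 - 1 = j' from by omega]

theorem pvInsL_shift (c : Char) (t : List Char) (j : Nat) :
    pvInsL (c :: t) (ozaScan c t + 1 + j) =
      (c :: t.take (ozaScan c t)) ++ pvInsL (t.drop (ozaScan c t)) j := by
  unfold pvInsL
  have hd1 : List.drop j (List.drop (ozaScan c t) t) = List.drop (ozaScan c t + j) t :=
    List.drop_drop
  have hd2 : List.drop (ozaScan c t + 1 + j) (c :: t) = List.drop (ozaScan c t + j) t := by
    rw [show ozaScan c t + 1 + j = (ozaScan c t + j) + 1 from by omega, List.drop_succ_cons]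
  have ht2 : List.take (ozaScan c t + 1 + j) (c :: t) = c :: List.take (ozaScan c t + j) t := by
    rw [show ozaScan c t + 1 + j = (ozaScan c t + j) + 1 from by omega, List.take_succ_cons]
  have ht3 : List.take (ozaScan c t + j) t =
      List.take (ozaScan c t) t ++ List.take j (List.drop (ozaScan c t) t) := List.take_add
  rw [hd1, hd2, ht2, ht3]
  simp [List.append_assoc]

theorem pvBrecL_low (c : Char) (t : List Char) (m : Nat) (hm : m ≤ ozaScan c t) :
    pvBrecL (c :: t) (m + 1) = (if c == '0' then ['0' :: c :: t] else []) := by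
  induction m with
  | zero =>
    have h0 : pvQ (c :: t) 0 = (c == '0') := by
      rw [pvQ_zero, pvP_block c t 0 (by omega)]
    rw [pvBrecL, h0, pvBrecL]
    by_cases hc : (c == '0') = true <;> simp [hc, pvInsL]
  | succ m ih =>
    rw [pvBrecL, pvQ_mid c t m hm]
    simpa using ih (by omega)

theorem pvBrecL_high (c : Char) (t : List Char) (j : Nat) :
    pvBrecL (c :: t) (ozaScan c t + 1 + j) =
      ((pvBrecL (t.drop (ozaScan c t)) j).map (fun v => (c :: t.take (ozaScan c t)) ++ v)) ++
        pvBrecL (c :: t) (ozaScan c t + 1) := by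
  induction j with
  | zero => simp [pvBrecL]
  | succ j ih =>
    rw [show ozaScan c t + 1 + (j + 1) = (ozaScan c t + 1 + j) + 1 from by omega]
    rw [pvBrecL, ih]
    rw [pvQ_shift c t j, pvInsL_shift c t j]
    rw [show pvBrecL (t.drop (ozaScan c t)) (j + 1) =
          (if pvQ (t.drop (ozaScan c t)) j then [pvInsL (t.drop (ozaScan c t)) j] else []) ++
            pvBrecL (t.drop (ozaScan c t)) j from rfl]
    by_cases hq : pvQ (t.drop (ozaScan c t)) j = true <;>
      simp [hq]

theorem ozaFold_aux (n : Nat) : ∀ (s : List Char), s.length ≤ n →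
    (ozaBlocks s).foldr (fun b acc => ozaStepB acc b) ([], []) = (s, pvBrecL s s.length) := by
  induction n with
  | zero =>
    intro s hs
    have : s = [] := List.eq_nil_of_length_eq_zero (by omega)
    subst this
    simp [ozaBlocks, pvBrecL]
  | succ n ih =>
    intro s hs
    cases s with
    | nil => simp [ozaBlocks, pvBrecL]
    | cons c t =>
      rw [ozaBlocks.eq_def]
      dsimp only
      have hk := scan_le c t
      have hrest : (t.drop (ozaScan c t)).length ≤ n := by
        simp only [List.length_drop]
        simp at hs
        omega
      rw [List.foldr_cons, ih _ hrest]
      have hsuffix : (c :: t.take (ozaScan c t)) ++ t.drop (ozaScan c t) = c :: t := by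
        simp [List.take_append_drop]
      have hlen : (c :: t).length = ozaScan c t + 1 + (t.drop (ozaScan c t)).length := by
        simp [List.length_drop]
        omega
      have hout : pvBrecL (c :: t) (c :: t).length =
          ((pvBrecL (t.drop (ozaScan c t)) (t.drop (ozaScan c t)).length).map
              (fun v => (c :: t.take (ozaScan c t)) ++ v)) ++
            (if c == '0' then ['0' :: c :: t] else []) := by
        rw [hlen, pvBrecL_high c t, pvBrecL_low c t (ozaScan c t) (le_refl _)]
      unfold ozaStepB
      rw [PySem.List.pyGetD_zero_cons]
      by_cases hc : (c == '0') = true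
      · rw [if_pos hc]
        dsimp only
        rw [hsuffix, hout, if_pos hc]
      · rw [if_neg hc]
        dsimp only
        rw [hsuffix, hout, if_neg hc]
        simp

theorem b_char (s : List Char) :
    one_zero_augmentation_alt (String.ofList s) = pvBrec s s.length := by
  unfold one_zero_augmentation_alt
  rw [String.toList_ofList, List.foldl_reverse, ozaFold_aux s.length s (le_refl _), pvBrec_eq_map]

-- ===== VERDICT (by name: the statement is the Claim_ definition above) =====
theorem one_zero_augmentation_spec : Claim_equal_one_zero_augmentation := by
  intro str _ hpre
  unfold Spec_one_zero_augmentation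
  have hstr : String.ofList str.toList = str := String.ofList_toList
  rw [← hstr, a_char str.toList hpre, b_char str.toList]
  obtain ⟨n, hn⟩ : ∃ n, str.toList.length = n + 1 :=
    ⟨str.toList.length - 1, by have := List.length_pos_iff.mpr hpre; omega⟩
  rw [hn, brec_outs]
  have hq : pvQ str.toList (n + 1) = false := by
    have := pvP_len str.toList
    rw [hn] at this
    simp [pvQ, this]
  rw [show pvOuts str.toList (n + 1) =
        (if pvQ str.toList (n + 1) then [pvIns str.toList (n + 1)] else []) ++
          pvOuts str.toList n from rfl, hq]
  simp
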